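-- pv_equiv track=rewrite | github.com/Wlaqnl/Algo | 프로그래머스/코딩테스트 연습/스택,큐/Lv2. 기능개발.py | solution
-- ===== SOURCE A (Python) =====
-- def solution(progresses, speeds):
--     day=[]
--     answer = []
--     N=len(progresses)
--
--     for i in range(N):
--         d = (100 - progresses[i]) // speeds[i]
--         r = (100 - progresses[i]) % speeds[i]
--         if r==0:
--             day.append(d)
--         else:
--             day.append(d+1)
--
--     i=0
--     while i<len(day):
--         a=day[i]
--         i+=1
--         cnt=1
--         if i<len(day):
--             for j in range(i,len(day)):
--                 if day[j]<=a:
--                     cnt+=1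
--                     i+=1
--                 else:
--                     answer.append(cnt)
--                     break
--             else:
--                 answer.append(cnt)
--         else:
--             answer.append(cnt)
--
--     return answer
-- ===== SOURCE B (Python) =====
-- def solution(progresses, speeds):
--     days = [-((p - 100) // s) for p, s in zip(progresses, speeds)]
--     maxes = []
--     m = None
--     for d in days:
--         if m is None or d > m:
--             m = d
--         maxes.append(m)
--     answer = []
--     prev = None
--     for m in maxes:
--         if prev is not None and m == prev:
--             answer[-1] += 1
--         else:
--             answer.append(1)
--         prev = m
--     return answer
-- ===== Notes on version B (the rewrite author's own statement) =====
-- stated objective: alternative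
-- what changed: A groups by comparing each element to the current group's first day inside an index-spliced nested while/for loop; B instead transforms the day list into its running prefix maxima and then run-length-encodes that sequence by equality, so grouping is done by equality on a derived sequence rather than by leader comparison.
-- outside the precondition, e.g. on solution([50], [0]): A raises ZeroDivisionError, B raises ZeroDivisionError; on solution([50, 50], [10]): A raises IndexError, B returns [1]
import Mathlib
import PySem

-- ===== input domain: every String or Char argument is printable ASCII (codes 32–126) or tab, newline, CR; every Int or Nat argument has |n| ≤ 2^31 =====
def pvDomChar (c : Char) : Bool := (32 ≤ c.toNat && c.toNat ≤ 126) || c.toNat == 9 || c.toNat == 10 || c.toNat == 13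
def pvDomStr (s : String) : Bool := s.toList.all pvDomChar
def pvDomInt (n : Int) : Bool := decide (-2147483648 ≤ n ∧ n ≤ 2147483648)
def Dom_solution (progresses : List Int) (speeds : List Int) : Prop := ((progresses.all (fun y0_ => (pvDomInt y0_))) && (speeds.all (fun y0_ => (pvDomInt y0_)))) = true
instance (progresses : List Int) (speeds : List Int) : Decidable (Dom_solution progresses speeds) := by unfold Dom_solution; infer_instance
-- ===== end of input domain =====

-- B replaces A's index-spliced leader-comparison grouping by a prefix-maximum transform followed by
-- run-length encoding by equality (objective: alternative; same O(n) cost).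


-- ===== PORT A =====
-- inner 'for j in range(i, len(day))' scan: counts elements ≤ a, returns (cnt, unread suffix)
def pvInner (a : Int) (cnt : Int) : List Int → Int × List Int
  | [] => (cnt, [])
  | d :: ds => if d ≤ a then pvInner a (cnt + 1) ds else (cnt, d :: ds)

-- termination fact for the outer while loop (cited by pvOuter's decreasing_by)
theorem pvInner_len_le (a cnt : Int) (l : List Int) : (pvInner a cnt l).2.length ≤ l.length := by
  induction l generalizing cnt with
  | nil => simp [pvInner]
  | cons d ds ih =>
      simp only [pvInner]
      split
      · exact Nat.le_trans (ih _) (by simp)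
      · simp

-- outer 'while i < len(day)' loop of A, as recursion on the unread suffix
def pvOuter : List Int → List Int
  | [] => []
  | a :: rest =>
      let pr := pvInner a 1 rest
      pr.1 :: pvOuter pr.2
termination_by l => l.length
decreasing_by
  have := pvInner_len_le a 1 rest
  simp only [List.length_cons]
  omega

def solution (progresses : List Int) (speeds : List Int) : List Int :=
  let N : Int := progresses.length
  let day := (PySem.List.pyRange 0 N 1).foldl
    (fun day i =>
      let d := PySem.Int.floordiv (100 - PySem.List.pyGetD progresses i 0) (PySem.List.pyGetD speeds i 0)
      let r := PySem.Int.mod (100 - PySem.List.pyGetD progresses i 0) (PySem.List.pyGetD speeds i 0)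
      if r = 0 then day ++ [d] else day ++ [d + 1]) []
  pvOuter day

-- ===== PORT B =====
-- ceil((100-p)/s) via Python's -((p-100)//s)
def pvCeilDay (p s : Int) : Int := -(PySem.Int.floordiv (p - 100) s)

-- one step of B's first loop: 'if m is None or d > m: m = d; maxes.append(m)'
def pvMaxStep (st : Option Int × List Int) (d : Int) : Option Int × List Int :=
  let m := match st.1 with | none => d | some mv => if mv < d then d else mv
  (some m, st.2 ++ [m])

-- one step of B's second loop: 'if prev is not None and m == prev: answer[-1] += 1 else: answer.append(1); prev = m'
-- (answer[-1] is only read when prev is set, where answer is provably nonempty; getLastD 0 is exact there)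
def pvRleStep (st : List Int × Option Int) (m : Int) : List Int × Option Int :=
  if st.2 = some m then (st.1.dropLast ++ [st.1.getLastD 0 + 1], some m)
  else (st.1 ++ [1], some m)

def solution_alt (progresses : List Int) (speeds : List Int) : List Int :=
  let days := (progresses.zip speeds).map (fun ps => pvCeilDay ps.1 ps.2)
  let maxes := (days.foldl pvMaxStep (none, [])).2
  (maxes.foldl pvRleStep ([], none)).1

-- ===== PRECONDITION & SPEC =====
-- Pre_ excludes exactly the inputs where Python A raises: an index past the end of speeds
-- (IndexError when speeds is shorter than progresses) or a zero speed used as divisor (ZeroDivisionError).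
def Pre_solution (progresses : List Int) (speeds : List Int) : Prop :=
  progresses.length ≤ speeds.length ∧ ∀ s ∈ speeds.take progresses.length, s ≠ 0
instance (progresses : List Int) (speeds : List Int) : Decidable (Pre_solution progresses speeds) := by unfold Pre_solution; infer_instance

def pvWitness_solution : List Int × List Int := ([93, 30, 55], [1, 30, 5])

def Spec_solution (progresses : List Int) (speeds : List Int) (out : List Int) : Prop := out = solution_alt progresses speeds
instance (progresses : List Int) (speeds : List Int) (out : List Int) : Decidable (Spec_solution progresses speeds out) := by unfold Spec_solution; infer_instance

-- ===== CLAIM (what is proved, stated in full; the proofs are below) =====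
def Claim_equal_solution : Prop := ∀ (progresses : List Int) (speeds : List Int), Dom_solution progresses speeds → Pre_solution progresses speeds → Spec_solution progresses speeds (solution progresses speeds)

-- ===== LEMMAS AND PROOFS =====

-- Python ceiling division for a positive divisor
theorem pvCeil_eq_pos (x s : Int) (hpos : 0 < s) :
    -(PySem.Int.floordiv (-x) s) =
      if PySem.Int.mod x s = 0 then PySem.Int.floordiv x s else PySem.Int.floordiv x s + 1 := by
  have hqr := PySem.Int.floordiv_mul_add_mod x s
  have h0 := PySem.Int.mod_nonneg x hpos
  have h1 := PySem.Int.mod_lt x hpos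
  split_ifs with hm
  · rw [PySem.Int.neg_floordiv_neg_eq_iff_of_pos hpos]
    constructor <;> nlinarith
  · rw [PySem.Int.neg_floordiv_neg_eq_iff_of_pos hpos]
    have : 0 < PySem.Int.mod x s := lt_of_le_of_ne h0 (Ne.symm hm)
    constructor <;> nlinarith

-- Python ceiling division: -((-x)//s) = x//s + (0 if x%s==0 else 1), any s ≠ 0
theorem pvCeil_eq (x s : Int) (hs : s ≠ 0) :
    -(PySem.Int.floordiv (-x) s) =
      if PySem.Int.mod x s = 0 then PySem.Int.floordiv x s else PySem.Int.floordiv x s + 1 := by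
  rcases lt_or_gt_of_ne hs with hneg | hpos
  · have hpos' : 0 < -s := by omega
    have e1 : PySem.Int.floordiv (-x) s = PySem.Int.floordiv (-(-x)) (-s) := by
      rw [PySem.Int.floordiv_neg_neg]
    have e2 : PySem.Int.floordiv x s = PySem.Int.floordiv (-x) (-s) := by
      rw [PySem.Int.floordiv_neg_neg]
    have e3 : (PySem.Int.mod x s = 0) ↔ (PySem.Int.mod (-x) (-s) = 0) := by
      rw [PySem.Int.mod_eq_zero_iff_dvd, PySem.Int.mod_eq_zero_iff_dvd]
      simp
    rw [e1, e2]
    simp only [e3]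
    exact pvCeil_eq_pos (-x) (-s) hpos'
  · exact pvCeil_eq_pos x s hpos

-- A's day list equals B's day list
theorem pvDays_eq (progresses speeds : List Int)
    (hlen : progresses.length ≤ speeds.length)
    (hnz : ∀ s ∈ speeds.take progresses.length, s ≠ 0) :
    (PySem.List.pyRange 0 (progresses.length : Int) 1).map
      (fun i =>
        let d := PySem.Int.floordiv (100 - PySem.List.pyGetD progresses i 0) (PySem.List.pyGetD speeds i 0)
        let r := PySem.Int.mod (100 - PySem.List.pyGetD progresses i 0) (PySem.List.pyGetD speeds i 0)
        if r = 0 then d else d + 1)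
      = (progresses.zip speeds).map (fun ps => pvCeilDay ps.1 ps.2) := by
  apply List.ext_getElem
  · simp [PySem.List.length_pyRange_one]
    omega
  · intro k h1 h2
    have hk : k < progresses.length := by
      simp [PySem.List.length_pyRange_one] at h1
      omega
    have hks : k < speeds.length := lt_of_lt_of_le hk hlen
    have hnz' : speeds[k] ≠ 0 := by
      have hmem : speeds[k] ∈ speeds.take progresses.length := by
        have : (speeds.take progresses.length)[k]'(by simp; omega) = speeds[k] := by
          simp
        rw [← this]
        exact List.getElem_mem _
      exact hnz _ hmem
    simp only [List.getElem_map, List.getElem_zip]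
    rw [PySem.List.getElem_pyRange_one]
    have hp : PySem.List.pyGetD progresses ((0:Int) + (k:Int)) 0 = progresses[k] := by
      rw [zero_add, PySem.List.pyGetD_natCast]
      exact List.getD_eq_getElem _ _ hk
    have hsp : PySem.List.pyGetD speeds ((0:Int) + (k:Int)) 0 = speeds[k] := by
      rw [zero_add, PySem.List.pyGetD_natCast]
      exact List.getD_eq_getElem _ _ hks
    simp only [hp, hsp, pvCeilDay]
    have := pvCeil_eq (100 - progresses[k]) speeds[k] hnz'
    rw [show progresses[k] - 100 = -(100 - progresses[k]) by ring]
    rw [this]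

-- the foldl of A's day loop builds exactly the mapped list
theorem pvFoldl_day (progresses speeds : List Int) :
    ((PySem.List.pyRange 0 (progresses.length : Int) 1).foldl
      (fun day i =>
        let d := PySem.Int.floordiv (100 - PySem.List.pyGetD progresses i 0) (PySem.List.pyGetD speeds i 0)
        let r := PySem.Int.mod (100 - PySem.List.pyGetD progresses i 0) (PySem.List.pyGetD speeds i 0)
        if r = 0 then day ++ [d] else day ++ [d + 1]) [])
    = (PySem.List.pyRange 0 (progresses.length : Int) 1).map
      (fun i =>
        let d := PySem.Int.floordiv (100 - PySem.List.pyGetD progresses i 0) (PySem.List.pyGetD speeds i 0)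
        let r := PySem.Int.mod (100 - PySem.List.pyGetD progresses i 0) (PySem.List.pyGetD speeds i 0)
        if r = 0 then d else d + 1) := by
  have hfn : (fun (day : List Int) (i : Int) =>
        let d := PySem.Int.floordiv (100 - PySem.List.pyGetD progresses i 0) (PySem.List.pyGetD speeds i 0)
        let r := PySem.Int.mod (100 - PySem.List.pyGetD progresses i 0) (PySem.List.pyGetD speeds i 0)
        if r = 0 then day ++ [d] else day ++ [d + 1])
      = (fun day i => day ++ [(fun i =>
        let d := PySem.Int.floordiv (100 - PySem.List.pyGetD progresses i 0) (PySem.List.pyGetD speeds i 0)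
        let r := PySem.Int.mod (100 - PySem.List.pyGetD progresses i 0) (PySem.List.pyGetD speeds i 0)
        if r = 0 then d else d + 1) i]) := by
    funext day i
    dsimp only
    split <;> rfl
  rw [hfn, PySem.List.foldl_append_singleton_eq_map]
  rfl

-- recursive view of B's first loop
def pvPM : Option Int → List Int → List Int
  | _, [] => []
  | m0, d :: ds =>
      let m := match m0 with | none => d | some mv => if mv < d then d else mv
      m :: pvPM (some m) ds

-- recursive view of B's second loop
def pvRleGo (v c : Int) : List Int → List Int
  | [] => [c]
  | m :: ms => if m = v then pvRleGo v (c + 1) ms else c :: pvRleGo m 1 ms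

def pvRle : List Int → List Int
  | [] => []
  | m :: ms => pvRleGo m 1 ms

-- the maxes foldl builds acc ++ pvPM seed
theorem pvFoldl_max (ms : List Int) : ∀ (o : Option Int) (acc : List Int),
    (ms.foldl pvMaxStep (o, acc)).2 = acc ++ pvPM o ms := by
  induction ms with
  | nil => intro o acc; simp [pvPM]
  | cons d ds ih =>
      intro o acc
      simp only [List.foldl_cons, pvMaxStep, pvPM]
      rw [ih]
      simp

-- the rle foldl with a nonempty accumulator ending in the current count
theorem pvFoldl_rle (ms : List Int) : ∀ (acc : List Int) (c v : Int),
    (ms.foldl pvRleStep (acc ++ [c], some v)).1 = acc ++ pvRleGo v c ms := by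
  induction ms with
  | nil => intro acc c v; simp [pvRleGo]
  | cons m ms ih =>
      intro acc c v
      simp only [List.foldl_cons, pvRleStep, pvRleGo]
      by_cases h : m = v
      · subst h
        simp only [List.dropLast_concat, List.getLastD_concat]
        exact ih acc (c + 1) m
      · have h1 : ¬ (some v = some m) := by simp [Ne.symm h]
        rw [if_neg h1, if_neg h, List.append_assoc]
        have := ih (acc ++ [c]) 1 m
        rw [List.append_assoc] at this
        simpa using this
  
-- top-level: B's second foldl computes pvRle
theorem pvFoldl_rle_top (ms : List Int) : (ms.foldl pvRleStep ([], none)).1 = pvRle ms := by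
  cases ms with
  | nil => simp [pvRle]
  | cons m ms =>
      simp only [List.foldl_cons, pvRleStep, pvRle]
      rw [if_neg (by simp)]
      exact pvFoldl_rle ms [] 1 m

-- core: A's leader scan agrees with RLE of the prefix-max sequence seeded with the leader
theorem pvRleGo_pvPM (rest : List Int) : ∀ (a c : Int),
    pvRleGo a c (pvPM (some a) rest) = (pvInner a c rest).1 :: pvOuter (pvInner a c rest).2 := by
  induction rest with
  | nil => intro a c; simp [pvPM, pvRleGo, pvInner, pvOuter]
  | cons d ds ih =>
      intro a c
      simp only [pvPM, pvInner]
      by_cases h : d ≤ a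
      · have hm : ¬ a < d := not_lt.mpr h
        simp only [if_neg hm, pvRleGo, if_pos h]
        exact ih a (c + 1)
      · have hm : a < d := not_le.mp h
        have hne : d ≠ a := ne_of_gt hm
        simp only [if_pos hm, pvRleGo, if_neg hne, if_neg h]
        rw [pvOuter]
        exact congrArg (c :: ·) (ih d 1)

-- main bridge: pvOuter = pvRle ∘ pvPM none
theorem pvOuter_eq_rle_pm (l : List Int) : pvOuter l = pvRle (pvPM none l) := by
  cases l with
  | nil => simp [pvOuter, pvPM, pvRle]
  | cons a rest =>
      rw [pvOuter]
      simp only [pvPM, pvRle]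
      exact (pvRleGo_pvPM rest a 1).symm

-- ===== VERDICT (by name: the statement is the Claim_ definition above) =====
theorem solution_spec : Claim_equal_solution := by
  intro P S _ hPre
  unfold Spec_solution solution solution_alt
  simp only []
  rw [pvFoldl_day, pvDays_eq P S hPre.1 hPre.2, pvFoldl_max, pvFoldl_rle_top]
  simp only [List.nil_append]
  exact pvOuter_eq_rle_pm _
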